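-- pv_equiv track=rewrite | github.com/RHChen36051114/temporary | simu_phase1.py | getQuitQueue
-- ===== SOURCE A (Python) =====
-- def getQuitQueue (arr, ser, length) :
-- 	quit = [arr[0]]
-- 	for cnt in range(1, length) :
-- 		if (arr[cnt] - (quit[cnt-1]+ser[cnt-1])) >= 0 :
-- 			quit.append (arr[cnt])
-- 		else :
-- 			quit.append (quit[cnt-1]+ser[cnt-1])
-- 	return quit
-- ===== SOURCE B (Python) =====
-- def getQuitQueue(arr, ser, length):
--     # Prefix sums of service times: pre[i] = ser[0] + ... + ser[i-1].
--     pre = [0]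
--     t = 0
--     for s in ser:
--         t += s
--         pre.append(t)
--     # quit[i] = pre[i] + max_{j<=i}(arr[j] - pre[j]); keep the running maximum.
--     best = arr[0]
--     out = [best]
--     for i in range(1, length):
--         best = max(best, arr[i] - pre[i])
--         out.append(pre[i] + best)
--     return out
-- ===== Notes on version B (the rewrite author's own statement) =====
-- stated objective: alternative
-- what changed: Replaces A's branching recurrence quit[i]=if arr[i]>=quit[i-1]+ser[i-1] then arr[i] else quit[i-1]+ser[i-1] by a prefix-sum table of ser plus a running maximum of arr[j]-pre[j], using the closed form quit[i]=pre[i]+max_{j<=i}(arr[j]-pre[j]).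
import Mathlib
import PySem

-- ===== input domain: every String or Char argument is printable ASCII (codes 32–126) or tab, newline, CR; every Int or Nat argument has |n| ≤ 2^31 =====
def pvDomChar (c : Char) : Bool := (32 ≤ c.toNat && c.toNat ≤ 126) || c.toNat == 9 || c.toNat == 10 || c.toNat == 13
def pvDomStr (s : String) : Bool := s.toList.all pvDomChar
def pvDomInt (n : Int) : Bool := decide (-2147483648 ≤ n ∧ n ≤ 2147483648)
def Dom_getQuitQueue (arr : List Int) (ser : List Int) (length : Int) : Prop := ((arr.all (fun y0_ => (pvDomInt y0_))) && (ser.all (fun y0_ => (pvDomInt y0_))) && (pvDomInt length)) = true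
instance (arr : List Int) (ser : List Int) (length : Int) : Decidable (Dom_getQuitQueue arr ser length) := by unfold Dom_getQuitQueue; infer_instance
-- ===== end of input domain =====

-- B replaces A's branching max-recurrence by a prefix-sum table of ser plus a running
-- maximum of arr[j]-pre[j] (closed form quit[i] = pre[i] + max_{j<=i}(arr[j]-pre[j]));
-- objective: alternative algorithm, same cost.

-- ===== PORT A =====
def getQuitQueue (arr : List Int) (ser : List Int) (length : Int) : List Int :=
  (PySem.List.pyRange 1 length 1).foldl
    (fun quit cnt =>
      if PySem.List.pyGetD arr cnt 0
           - (PySem.List.pyGetD quit (cnt - 1) 0 + PySem.List.pyGetD ser (cnt - 1) 0) ≥ 0 then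
        quit ++ [PySem.List.pyGetD arr cnt 0]
      else
        quit ++ [PySem.List.pyGetD quit (cnt - 1) 0 + PySem.List.pyGetD ser (cnt - 1) 0])
    [PySem.List.pyGetD arr 0 0]

-- ===== PORT B =====
-- the prefix-sum table 'pre' built by Source B's first loop
def pvPreTable (ser : List Int) : List Int :=
  (ser.foldl (fun p s => (p.1 ++ [p.2 + s], p.2 + s)) (([0] : List Int), (0 : Int))).1

def getQuitQueue_alt (arr : List Int) (ser : List Int) (length : Int) : List Int :=
  ((PySem.List.pyRange 1 length 1).foldl
    (fun st i =>
      (max st.1 (PySem.List.pyGetD arr i 0 - PySem.List.pyGetD (pvPreTable ser) i 0),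
       st.2 ++ [PySem.List.pyGetD (pvPreTable ser) i 0
                  + max st.1 (PySem.List.pyGetD arr i 0 - PySem.List.pyGetD (pvPreTable ser) i 0)]))
    (PySem.List.pyGetD arr 0 0, [PySem.List.pyGetD arr 0 0])).2

-- ===== PRECONDITION & SPEC =====
-- Pre_ excludes exactly the inputs on which the Python A raises IndexError:
-- empty arr (arr[0]), length > len(arr) (arr[cnt]), or length > len(ser)+1 (ser[cnt-1]).
def Pre_getQuitQueue (arr : List Int) (ser : List Int) (length : Int) : Prop :=
  arr ≠ [] ∧ length ≤ (arr.length : Int) ∧ length ≤ (ser.length : Int) + 1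
instance (arr : List Int) (ser : List Int) (length : Int) : Decidable (Pre_getQuitQueue arr ser length) := by unfold Pre_getQuitQueue; infer_instance

def pvWitness_getQuitQueue : List Int × List Int × Int := ([3, 1, 9, 2], [2, 2, 2], 4)

def Spec_getQuitQueue (arr : List Int) (ser : List Int) (length : Int) (out : List Int) : Prop := out = getQuitQueue_alt arr ser length
instance (arr : List Int) (ser : List Int) (length : Int) (out : List Int) : Decidable (Spec_getQuitQueue arr ser length out) := by unfold Spec_getQuitQueue; infer_instance

-- ===== CLAIM (what is proved, stated in full; the proofs are below) =====
def Claim_equal_getQuitQueue : Prop := ∀ (arr : List Int) (ser : List Int) (length : Int), Dom_getQuitQueue arr ser length → Pre_getQuitQueue arr ser length → Spec_getQuitQueue arr ser length (getQuitQueue arr ser length)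

-- ===== LEMMAS AND PROOFS =====

-- prefix sum of the first k service times
def pvP (ser : List Int) (k : Nat) : Int := (ser.take k).sum

-- reference recurrence: (quit list after step n, its last element)
def pvG (arr ser : List Int) : Nat → List Int × Int
  | 0 => ([PySem.List.pyGetD arr 0 0], PySem.List.pyGetD arr 0 0)
  | n + 1 =>
    let g := pvG arr ser n
    let a := PySem.List.pyGetD arr (↑n + 1) 0
    let s := PySem.List.pyGetD ser ↑n 0
    let v := if a - (g.2 + s) ≥ 0 then a else g.2 + s
    (g.1 ++ [v], v)

lemma pvG_len (arr ser : List Int) (n : Nat) : (pvG arr ser n).1.length = n + 1 := by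
  induction n with
  | zero => rfl
  | succ n ih => simp [pvG, ih]

lemma pvG_last (arr ser : List Int) (n : Nat) :
    PySem.List.pyGetD (pvG arr ser n).1 ↑n 0 = (pvG arr ser n).2 := by
  cases n with
  | zero => rfl
  | succ n =>
    simp only [pvG, PySem.List.pyGetD_natCast]
    rw [List.getD_eq_getElem?_getD, List.getElem?_append_right (by simp [pvG_len])]
    simp [pvG_len]

lemma pv_preFold : ∀ (ser : List Int) (acc : List Int) (t : Int),
    (ser.foldl (fun p s => (p.1 ++ [p.2 + s], p.2 + s)) (acc, t)).1
      = acc ++ (List.range ser.length).map (fun k => t + (ser.take (k + 1)).sum) := by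
  intro ser
  induction ser with
  | nil => simp
  | cons s ser ih =>
    intro acc t
    rw [List.foldl_cons, ih]
    simp only [List.length_cons, List.range_succ_eq_map, List.map_cons, List.map_map,
      List.take_succ_cons, List.sum_cons, List.take_zero, List.sum_nil,
      add_zero, List.append_assoc, List.singleton_append]
    congr 2
    apply List.map_congr_left
    intro k _
    simp only [Function.comp_apply]
    ring

lemma pv_pre_get (ser : List Int) (i : Nat) (hi : i ≤ ser.length) :
    PySem.List.pyGetD (pvPreTable ser) ↑i 0 = pvP ser i := by
  rw [pvPreTable, pv_preFold]
  simp only [PySem.List.pyGetD_natCast]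
  cases i with
  | zero => simp [pvP]
  | succ i =>
    rw [List.getD_eq_getElem?_getD]
    simp only [List.singleton_append, List.getElem?_cons_succ]
    rw [List.getElem?_map, List.getElem?_range (by omega)]
    simp [pvP]

lemma pvP_succ (ser : List Int) (n : Nat) (hn : n < ser.length) :
    pvP ser (n + 1) = pvP ser n + PySem.List.pyGetD ser ↑n 0 := by
  simp only [pvP, PySem.List.pyGetD_natCast]
  rw [List.sum_take_succ ser n hn, List.getD_eq_getElem?_getD, List.getElem?_eq_getElem hn]
  rfl

lemma pv_loopA (arr ser : List Int) (n : Nat) :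
    ((List.range n).map (fun k => (1 : Int) + ↑k)).foldl
      (fun quit cnt =>
        if PySem.List.pyGetD arr cnt 0
             - (PySem.List.pyGetD quit (cnt - 1) 0 + PySem.List.pyGetD ser (cnt - 1) 0) ≥ 0 then
          quit ++ [PySem.List.pyGetD arr cnt 0]
        else
          quit ++ [PySem.List.pyGetD quit (cnt - 1) 0 + PySem.List.pyGetD ser (cnt - 1) 0])
      [PySem.List.pyGetD arr 0 0] = (pvG arr ser n).1 := by
  induction n with
  | zero => rfl
  | succ n ih =>
    rw [List.range_succ, List.map_append, List.foldl_append, ih]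
    have h2 : (1 : Int) + ↑n = ↑n + 1 := by omega
    have h1 : (↑n : Int) + 1 - 1 = ↑n := by omega
    simp only [List.map_cons, List.map_nil, List.foldl_cons, List.foldl_nil, h2, h1,
      pvG_last arr ser n]
    simp only [pvG]
    split_ifs <;> rfl

lemma pv_loopB (arr ser : List Int) :
    ∀ n : Nat, n ≤ ser.length →
    ((List.range n).map (fun k => (1 : Int) + ↑k)).foldl
      (fun st i =>
        (max st.1 (PySem.List.pyGetD arr i 0 - PySem.List.pyGetD (pvPreTable ser) i 0),
         st.2 ++ [PySem.List.pyGetD (pvPreTable ser) i 0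
                    + max st.1 (PySem.List.pyGetD arr i 0 - PySem.List.pyGetD (pvPreTable ser) i 0)]))
      (PySem.List.pyGetD arr 0 0, [PySem.List.pyGetD arr 0 0])
      = ((pvG arr ser n).2 - pvP ser n, (pvG arr ser n).1) := by
  intro n
  induction n with
  | zero => intro _; simp [pvG, pvP]
  | succ n ih =>
    intro hn
    rw [List.range_succ, List.map_append, List.foldl_append, ih (by omega)]
    have h2 : (1 : Int) + ↑n = ((↑n + 1 : Nat) : Int) := by push_cast; omega
    simp only [List.map_cons, List.map_nil, List.foldl_cons, List.foldl_nil, h2,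
      pv_pre_get ser (n + 1) (by omega)]
    have hs := pvP_succ ser n (by omega)
    simp only [pvG, Prod.mk.injEq]
    push_cast
    constructor
    · rw [hs]; split_ifs with h <;> omega
    · congr 1
      rw [hs]; split_ifs with h <;> [skip; skip] <;> congr 1 <;> omega

-- ===== VERDICT (by name: the statement is the Claim_ definition above) =====
theorem getQuitQueue_spec : Claim_equal_getQuitQueue := by
  intro arr ser length _ hpre
  obtain ⟨_, _, hser⟩ := hpre
  unfold Spec_getQuitQueue getQuitQueue getQuitQueue_alt
  by_cases hl : length ≤ 1
  · rw [PySem.List.pyRange_one_eq_nil hl]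
    simp
  · have hns : (length - 1).toNat ≤ ser.length := by omega
    simp only [PySem.List.pyRange_one]
    rw [pv_loopA arr ser (length - 1).toNat, pv_loopB arr ser (length - 1).toNat hns]
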